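-- pv_equiv track=rewrite | github.com/durgapradeepch/correlation-analysis | convert_insights.py | classify_token_type
-- ===== SOURCE A (Python) =====
-- from typing import Dict, List, Any, Optional
--
-- def classify_token_type(series_fingerprint: str, situations: List[Dict]) -> str:
--     """Classify a series fingerprint into a token type based on associated entities."""
--
--     # Find situations that contain this series
--     entity_types = set()
--
--     for situation in situations:
--         episodes = situation.get('episodes', [])
--         for episode in episodes:
--             if episode.get('fingerprint') == series_fingerprint:
--                 # Check the entity_key associated with this episode
--                 entity = episode.get('entity_key', '')
--
--                 if entity.startswith('cluster:'):
--                     entity_types.add('cluster')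
--                 elif entity.startswith('pod:'):
--                     entity_types.add('pod')
--                 elif entity.startswith('service:'):
--                     entity_types.add('service')
--                 elif entity.startswith('deployment:'):
--                     entity_types.add('deployment')
--                 elif entity.startswith('namespace:'):
--                     entity_types.add('namespace')
--                 elif entity.startswith('node:'):
--                     entity_types.add('node')
--                 elif 'cronjob' in entity.lower():
--                     entity_types.add('cronjob')
--                 elif 'job' in entity.lower():
--                     entity_types.add('job')
--                 else:
--                     entity_types.add('other')
--
--     # Return the most specific type found, prioritizing infrastructure over workloads
--     if 'cluster' in entity_types:
--         return 'cluster'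
--     elif 'service' in entity_types:
--         return 'service'
--     elif 'deployment' in entity_types:
--         return 'deployment'
--     elif 'pod' in entity_types:
--         return 'pod'
--     elif 'cronjob' in entity_types:
--         return 'cronjob'
--     elif 'job' in entity_types:
--         return 'job'
--     elif 'namespace' in entity_types:
--         return 'namespace'
--     elif 'node' in entity_types:
--         return 'node'
--     elif entity_types:
--         return list(entity_types)[0]  # Return any found type
--
--     return 'other'  # Fallback if no match found
-- ===== SOURCE B (Python) =====
-- # Single pass keeping the minimum priority rank seen; no set, no trailing priority cascade.
-- from typing import Dict, List
--
-- _NAMES = ['cluster', 'service', 'deployment', 'pod', 'cronjob', 'job', 'namespace', 'node', 'other']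
--
-- def _rank(entity: str) -> int:
--     if entity.startswith('cluster:'):
--         return 0
--     if entity.startswith('pod:'):
--         return 3
--     if entity.startswith('service:'):
--         return 1
--     if entity.startswith('deployment:'):
--         return 2
--     if entity.startswith('namespace:'):
--         return 6
--     if entity.startswith('node:'):
--         return 7
--     lowered = entity.lower()
--     if 'cronjob' in lowered:
--         return 4
--     if 'job' in lowered:
--         return 5
--     return 8
--
-- def classify_token_type(series_fingerprint: str, situations: List[Dict]) -> str:
--     best = 8
--     for situation in situations:
--         for episode in situation.get('episodes', []):
--             if episode.get('fingerprint') == series_fingerprint: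
--                 best = min(best, _rank(episode.get('entity_key', '')))
--     return _NAMES[best]
-- ===== Notes on version B (the rewrite author's own statement) =====
-- stated objective: simpler
-- what changed: B replaces A's set of entity-type names plus the trailing nine-branch priority cascade by a single pass that classifies each matching episode directly to a priority rank and keeps the minimum rank, mapping it back to a name at the end.
import Mathlib
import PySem

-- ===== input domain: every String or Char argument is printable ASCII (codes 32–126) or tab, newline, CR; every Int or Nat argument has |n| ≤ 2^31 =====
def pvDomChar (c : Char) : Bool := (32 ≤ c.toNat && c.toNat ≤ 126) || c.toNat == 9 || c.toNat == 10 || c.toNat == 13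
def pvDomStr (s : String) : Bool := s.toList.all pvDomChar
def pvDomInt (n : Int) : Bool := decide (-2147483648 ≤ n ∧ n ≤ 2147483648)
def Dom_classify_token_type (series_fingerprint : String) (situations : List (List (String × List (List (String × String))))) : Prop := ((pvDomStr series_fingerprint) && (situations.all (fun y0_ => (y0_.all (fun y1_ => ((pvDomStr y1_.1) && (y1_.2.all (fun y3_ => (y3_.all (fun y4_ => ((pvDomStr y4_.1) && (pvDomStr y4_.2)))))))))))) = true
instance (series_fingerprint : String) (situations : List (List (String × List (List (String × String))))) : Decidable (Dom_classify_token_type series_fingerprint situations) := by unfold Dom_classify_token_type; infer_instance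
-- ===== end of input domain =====

-- B replaces A's set-of-type-names + trailing priority cascade by one pass keeping the
-- minimum priority rank of the matching episodes' entity types (objective: simpler).

-- ===== PORT A =====
-- literal transliteration of Source A; list(entity_types)[0] is only reachable when the set
-- holds exactly ["other"], so taking the head of the PySem.Set's list is exact there.
def classify_token_type (series_fingerprint : String) (situations : List (List (String × List (List (String × String))))) : String :=
  let entity_types : PySem.Set String :=
    situations.foldl (fun acc situation =>
      (PySem.Dict.getD (PySem.Dict.mk situation) "episodes" []).foldl (fun acc episode =>
        if PySem.Dict.get? (PySem.Dict.mk episode) "fingerprint" = some series_fingerprint then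
          let entity := PySem.Dict.getD (PySem.Dict.mk episode) "entity_key" ""
          if PySem.Str.startswith entity "cluster:" then PySem.Set.add acc "cluster"
          else if PySem.Str.startswith entity "pod:" then PySem.Set.add acc "pod"
          else if PySem.Str.startswith entity "service:" then PySem.Set.add acc "service"
          else if PySem.Str.startswith entity "deployment:" then PySem.Set.add acc "deployment"
          else if PySem.Str.startswith entity "namespace:" then PySem.Set.add acc "namespace"
          else if PySem.Str.startswith entity "node:" then PySem.Set.add acc "node"
          else if PySem.Str.isIn "cronjob" (PySem.Str.lower entity) then PySem.Set.add acc "cronjob"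
          else if PySem.Str.isIn "job" (PySem.Str.lower entity) then PySem.Set.add acc "job"
          else PySem.Set.add acc "other"
        else acc) acc) PySem.Set.empty
  if PySem.Set.contains entity_types "cluster" then "cluster"
  else if PySem.Set.contains entity_types "service" then "service"
  else if PySem.Set.contains entity_types "deployment" then "deployment"
  else if PySem.Set.contains entity_types "pod" then "pod"
  else if PySem.Set.contains entity_types "cronjob" then "cronjob"
  else if PySem.Set.contains entity_types "job" then "job"
  else if PySem.Set.contains entity_types "namespace" then "namespace"
  else if PySem.Set.contains entity_types "node" then "node"
  else match entity_types with
    | x :: _ => x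
    | [] => "other"

-- ===== PORT B =====  (transliteration of Source B: classify each matching episode straight
-- to a priority rank, keep the minimum, index the name table at the end)
def pvRankOf (entity : String) : Nat :=
  if PySem.Str.startswith entity "cluster:" then 0
  else if PySem.Str.startswith entity "pod:" then 3
  else if PySem.Str.startswith entity "service:" then 1
  else if PySem.Str.startswith entity "deployment:" then 2
  else if PySem.Str.startswith entity "namespace:" then 6
  else if PySem.Str.startswith entity "node:" then 7
  else if PySem.Str.isIn "cronjob" (PySem.Str.lower entity) then 4
  else if PySem.Str.isIn "job" (PySem.Str.lower entity) then 5
  else 8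

-- Source B's _NAMES[best]; best is always ≤ 8, the default is never used
def pvName (n : Nat) : String :=
  List.getD ["cluster", "service", "deployment", "pod", "cronjob", "job", "namespace", "node", "other"] n "other"

def classify_token_type_alt (series_fingerprint : String) (situations : List (List (String × List (List (String × String))))) : String :=
  let best : Nat :=
    situations.foldl (fun b situation =>
      (PySem.Dict.getD (PySem.Dict.mk situation) "episodes" []).foldl (fun b episode =>
        if PySem.Dict.get? (PySem.Dict.mk episode) "fingerprint" = some series_fingerprint then
          min b (pvRankOf (PySem.Dict.getD (PySem.Dict.mk episode) "entity_key" ""))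
        else b) b) 8
  pvName best

-- ===== PRECONDITION & SPEC =====
def Spec_classify_token_type (series_fingerprint : String) (situations : List (List (String × List (List (String × String))))) (out : String) : Prop := out = classify_token_type_alt series_fingerprint situations
instance (series_fingerprint : String) (situations : List (List (String × List (List (String × String))))) (out : String) : Decidable (Spec_classify_token_type series_fingerprint situations out) := by unfold Spec_classify_token_type; infer_instance

-- ===== CLAIM (what is proved, stated in full; the proofs are below) =====
def Claim_equal_classify_token_type : Prop := ∀ (series_fingerprint : String) (situations : List (List (String × List (List (String × String))))), Dom_classify_token_type series_fingerprint situations → Spec_classify_token_type series_fingerprint situations (classify_token_type series_fingerprint situations)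

-- ===== LEMMAS AND PROOFS =====

def pvNames : List String := ["cluster", "service", "deployment", "pod", "cronjob", "job", "namespace", "node", "other"]

def pvRank (t : String) : Nat :=
  if t = "cluster" then 0 else if t = "service" then 1 else if t = "deployment" then 2
  else if t = "pod" then 3 else if t = "cronjob" then 4 else if t = "job" then 5
  else if t = "namespace" then 6 else if t = "node" then 7 else 8

def mrankOf (S : List String) : Nat := S.foldl (fun m x => min m (pvRank x)) 8

def finishA (entity_types : PySem.Set String) : String :=
  if PySem.Set.contains entity_types "cluster" then "cluster"
  else if PySem.Set.contains entity_types "service" then "service"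
  else if PySem.Set.contains entity_types "deployment" then "deployment"
  else if PySem.Set.contains entity_types "pod" then "pod"
  else if PySem.Set.contains entity_types "cronjob" then "cronjob"
  else if PySem.Set.contains entity_types "job" then "job"
  else if PySem.Set.contains entity_types "namespace" then "namespace"
  else if PySem.Set.contains entity_types "node" then "node"
  else match entity_types with
    | x :: _ => x
    | [] => "other"

lemma pvRank_le8 (t : String) : pvRank t ≤ 8 := by
  unfold pvRank; split_ifs <;> omega

lemma mrank_aux (S : List String) : ∀ m : Nat, m ≤ 8 → S.foldl (fun m x => min m (pvRank x)) m = min m (mrankOf S) := by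
  induction S with
  | nil => intro m hm; simp [mrankOf]; omega
  | cons y S ih =>
    intro m hm
    have h8 := pvRank_le8 y
    simp only [List.foldl_cons, mrankOf] at *
    rw [ih (min m (pvRank y)) (by omega), ih (min 8 (pvRank y)) (by omega)]
    omega

lemma mrank_cons (y : String) (S : List String) : mrankOf (y :: S) = min (pvRank y) (mrankOf S) := by
  have h8 := pvRank_le8 y
  have := mrank_aux S (min 8 (pvRank y)) (by omega)
  simp only [mrankOf, List.foldl_cons] at *
  omega

lemma mrank_le8 (S : List String) : mrankOf S ≤ 8 := by
  induction S with
  | nil => simp [mrankOf]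
  | cons y S ih => rw [mrank_cons]; omega

lemma mrank_mem_le {x : String} {S : List String} (hx : x ∈ S) : mrankOf S ≤ pvRank x := by
  induction S with
  | nil => simp at hx
  | cons y S ih =>
    rw [mrank_cons]
    rcases List.mem_cons.mp hx with rfl | hx
    · omega
    · have := ih hx; omega

lemma mrank_append (S : List String) (n : String) : mrankOf (S ++ [n]) = min (mrankOf S) (pvRank n) := by
  simp [mrankOf, List.foldl_append]

lemma mrank_add (S : PySem.Set String) (n : String) : mrankOf (PySem.Set.add S n) = min (mrankOf S) (pvRank n) := by
  unfold PySem.Set.add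
  split_ifs with h
  · have hn : n ∈ S := by simpa [PySem.Set.contains] using h
    have := mrank_mem_le hn
    omega
  · exact mrank_append S n

lemma mrank_achieved {S : List String} (h : mrankOf S < 8) : ∃ x ∈ S, pvRank x = mrankOf S := by
  induction S with
  | nil => simp [mrankOf] at h
  | cons y S ih =>
    rw [mrank_cons] at h ⊢
    by_cases hy : pvRank y ≤ mrankOf S
    · exact ⟨y, List.mem_cons_self, by omega⟩
    · have hS : mrankOf S < 8 := by omega
      obtain ⟨x, hxS, hxr⟩ := ih hS
      exact ⟨x, List.mem_cons_of_mem _ hxS, by omega⟩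

lemma name_rank (x : String) (hx : x ∈ pvNames) : pvName (pvRank x) = x := by
  simp only [pvNames, List.mem_cons, List.not_mem_nil, or_false] at hx
  rcases hx with rfl | rfl | rfl | rfl | rfl | rfl | rfl | rfl | rfl <;> rfl

lemma contains_of_mrank {S : PySem.Set String} (hc : ∀ x ∈ S, x ∈ pvNames)
    (h : mrankOf S < 8) : PySem.Set.contains S (pvName (mrankOf S)) = true := by
  obtain ⟨x, hxS, hxr⟩ := mrank_achieved h
  rw [← hxr, name_rank x (hc x hxS)]
  simpa [PySem.Set.contains] using hxS

lemma finish_eq (S : PySem.Set String) (hc : ∀ x ∈ S, x ∈ pvNames) :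
    finishA S = pvName (mrankOf S) := by
  have h8 := mrank_le8 S
  have hcm : ∀ t : String, PySem.Set.contains S t = true → mrankOf S ≤ pvRank t := by
    intro t ht
    exact mrank_mem_le (by simpa [PySem.Set.contains] using ht)
  unfold finishA
  split_ifs with h0 h1 h2 h3 h4 h5 h6 h7
  · have hle : mrankOf S ≤ 0 := by simpa [pvRank] using hcm _ h0
    have hm : mrankOf S = 0 := by omega
    rw [hm]; rfl
  · have hle : mrankOf S ≤ 1 := by simpa [pvRank] using hcm _ h1
    have hm : mrankOf S = 1 := by
      rcases Nat.lt_or_ge (mrankOf S) 1 with hlt | hge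
      · exfalso; have hcon := contains_of_mrank hc (by omega)
        interval_cases hv : mrankOf S; simp_all [pvName]
      · omega
    rw [hm]; rfl
  · have hle : mrankOf S ≤ 2 := by simpa [pvRank] using hcm _ h2
    have hm : mrankOf S = 2 := by
      rcases Nat.lt_or_ge (mrankOf S) 2 with hlt | hge
      · exfalso; have hcon := contains_of_mrank hc (by omega)
        interval_cases hv : mrankOf S <;> simp_all [pvName]
      · omega
    rw [hm]; rfl
  · have hle : mrankOf S ≤ 3 := by simpa [pvRank] using hcm _ h3
    have hm : mrankOf S = 3 := by
      rcases Nat.lt_or_ge (mrankOf S) 3 with hlt | hge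
      · exfalso; have hcon := contains_of_mrank hc (by omega)
        interval_cases hv : mrankOf S <;> simp_all [pvName]
      · omega
    rw [hm]; rfl
  · have hle : mrankOf S ≤ 4 := by simpa [pvRank] using hcm _ h4
    have hm : mrankOf S = 4 := by
      rcases Nat.lt_or_ge (mrankOf S) 4 with hlt | hge
      · exfalso; have hcon := contains_of_mrank hc (by omega)
        interval_cases hv : mrankOf S <;> simp_all [pvName]
      · omega
    rw [hm]; rfl
  · have hle : mrankOf S ≤ 5 := by simpa [pvRank] using hcm _ h5
    have hm : mrankOf S = 5 := by
      rcases Nat.lt_or_ge (mrankOf S) 5 with hlt | hge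
      · exfalso; have hcon := contains_of_mrank hc (by omega)
        interval_cases hv : mrankOf S <;> simp_all [pvName]
      · omega
    rw [hm]; rfl
  · have hle : mrankOf S ≤ 6 := by simpa [pvRank] using hcm _ h6
    have hm : mrankOf S = 6 := by
      rcases Nat.lt_or_ge (mrankOf S) 6 with hlt | hge
      · exfalso; have hcon := contains_of_mrank hc (by omega)
        interval_cases hv : mrankOf S <;> simp_all [pvName]
      · omega
    rw [hm]; rfl
  · have hle : mrankOf S ≤ 7 := by simpa [pvRank] using hcm _ h7
    have hm : mrankOf S = 7 := by
      rcases Nat.lt_or_ge (mrankOf S) 7 with hlt | hge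
      · exfalso; have hcon := contains_of_mrank hc (by omega)
        interval_cases hv : mrankOf S <;> simp_all [pvName]
      · omega
    rw [hm]; rfl
  · have hm : mrankOf S = 8 := by
      rcases Nat.lt_or_ge (mrankOf S) 8 with hlt | hge
      · exfalso; have hcon := contains_of_mrank hc hlt
        interval_cases hv : mrankOf S <;> simp_all [pvName]
      · omega
    rw [hm]
    cases S with
    | nil => rfl
    | cons y T =>
      have hy : y ∈ pvNames := hc y List.mem_cons_self
      simp only [pvNames, List.mem_cons, List.not_mem_nil, or_false] at hy
      rcases hy with rfl | rfl | rfl | rfl | rfl | rfl | rfl | rfl | rfl <;>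
        simp_all [PySem.Set.contains, pvName]

lemma pairfold {α σ τ : Type} (f : σ → α → σ) (g : τ → α → τ) (R : σ → τ → Prop)
    (hstep : ∀ s t a, R s t → R (f s a) (g t a)) :
    ∀ (l : List α) (s : σ) (t : τ), R s t → R (l.foldl f s) (l.foldl g t) := by
  intro l
  induction l with
  | nil => intro s t h; exact h
  | cons a l ih => intro s t h; exact ih _ _ (hstep s t a h)

-- ===== VERDICT (by name: the statement is the Claim_ definition above) =====
theorem classify_token_type_spec : Claim_equal_classify_token_type := by
  intro sf sits _
  unfold Spec_classify_token_type classify_token_type classify_token_type_alt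
  have hfinal :
      (fun (S : PySem.Set String) (b : Nat) => (∀ x ∈ S, x ∈ pvNames) ∧ b = mrankOf S)
        (sits.foldl (fun acc situation =>
          (PySem.Dict.getD (PySem.Dict.mk situation) "episodes" []).foldl (fun acc episode =>
            if PySem.Dict.get? (PySem.Dict.mk episode) "fingerprint" = some sf then
              let entity := PySem.Dict.getD (PySem.Dict.mk episode) "entity_key" ""
              if PySem.Str.startswith entity "cluster:" then PySem.Set.add acc "cluster"
              else if PySem.Str.startswith entity "pod:" then PySem.Set.add acc "pod"
              else if PySem.Str.startswith entity "service:" then PySem.Set.add acc "service"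
              else if PySem.Str.startswith entity "deployment:" then PySem.Set.add acc "deployment"
              else if PySem.Str.startswith entity "namespace:" then PySem.Set.add acc "namespace"
              else if PySem.Str.startswith entity "node:" then PySem.Set.add acc "node"
              else if PySem.Str.isIn "cronjob" (PySem.Str.lower entity) then PySem.Set.add acc "cronjob"
              else if PySem.Str.isIn "job" (PySem.Str.lower entity) then PySem.Set.add acc "job"
              else PySem.Set.add acc "other"
            else acc) acc) PySem.Set.empty)
        (sits.foldl (fun b situation =>
          (PySem.Dict.getD (PySem.Dict.mk situation) "episodes" []).foldl (fun b episode =>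
            if PySem.Dict.get? (PySem.Dict.mk episode) "fingerprint" = some sf then
              min b (pvRankOf (PySem.Dict.getD (PySem.Dict.mk episode) "entity_key" ""))
            else b) b) 8) := by
    refine pairfold _ _ (fun S b => (∀ x ∈ S, x ∈ pvNames) ∧ b = mrankOf S) ?_ sits PySem.Set.empty 8 ?_
    · intro S b situation hSb
      refine pairfold _ _ (fun S b => (∀ x ∈ S, x ∈ pvNames) ∧ b = mrankOf S) ?_ _ S b hSb
      intro S b episode hSb
      obtain ⟨hcan, hrank⟩ := hSb
      by_cases hfp : PySem.Dict.get? (PySem.Dict.mk episode) "fingerprint" = some sf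
      · simp only [if_pos hfp]
        have hadd : ∀ n : String, n ∈ pvNames →
            (∀ x ∈ PySem.Set.add S n, x ∈ pvNames) ∧
              min b (pvRank n) = mrankOf (PySem.Set.add S n) := by
          intro n hn
          refine ⟨?_, ?_⟩
          · intro x hx
            rcases (PySem.Set.mem_add S n x).mp hx with h | rfl
            · exact hcan x h
            · exact hn
          · rw [mrank_add, hrank]
        unfold pvRankOf
        split_ifs <;>
          first
            | exact hadd "cluster" (by simp [pvNames])
            | exact hadd "pod" (by simp [pvNames])
            | exact hadd "service" (by simp [pvNames])
            | exact hadd "deployment" (by simp [pvNames])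
            | exact hadd "namespace" (by simp [pvNames])
            | exact hadd "node" (by simp [pvNames])
            | exact hadd "cronjob" (by simp [pvNames])
            | exact hadd "job" (by simp [pvNames])
            | exact hadd "other" (by simp [pvNames])
      · simp only [if_neg hfp]
        exact ⟨hcan, hrank⟩
    · exact ⟨by simp [PySem.Set.empty], rfl⟩
  obtain ⟨hcan, hrank⟩ := hfinal
  calc _ = finishA _ := rfl
    _ = pvName (mrankOf _) := finish_eq _ hcan
    _ = _ := by rw [← hrank]
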